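-- pv_equiv track=rewrite | github.com/mjalalimanesh/think-python-book | chapter9-Case-study-word-play.py | have_three_doubles
-- ===== SOURCE A (Python) =====
-- def have_three_doubles(word):
--     word = word.lower()
--     num_doubles = 0
--     i = 0
--     while i < (len(word) - 1):
--         if word[i] == word[i + 1]:
--             num_doubles = num_doubles + 1
--             i = i + 2
--             if num_doubles > 2:
--                 return True
--             continue
--         i = i + 1 - 2 * num_doubles
--         num_doubles = 0
--     return False
-- ===== SOURCE B (Python) =====
-- def have_three_doubles(word):
--     word = word.lower()
--     n = len(word)
--     for i in range(n - 5):
--         if word[i] == word[i + 1] and word[i + 2] == word[i + 3] \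
--                 and word[i + 4] == word[i + 5]:
--             return True
--     return False
-- ===== Notes on version B (the rewrite author's own statement) =====
-- stated objective: simpler
-- what changed: Replaces A's stateful while-loop with backtracking index arithmetic (i = i + 1 - 2*num_doubles) by a flat sliding-window scan testing, for each start i, the three aligned consecutive doubles directly.
import Mathlib
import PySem

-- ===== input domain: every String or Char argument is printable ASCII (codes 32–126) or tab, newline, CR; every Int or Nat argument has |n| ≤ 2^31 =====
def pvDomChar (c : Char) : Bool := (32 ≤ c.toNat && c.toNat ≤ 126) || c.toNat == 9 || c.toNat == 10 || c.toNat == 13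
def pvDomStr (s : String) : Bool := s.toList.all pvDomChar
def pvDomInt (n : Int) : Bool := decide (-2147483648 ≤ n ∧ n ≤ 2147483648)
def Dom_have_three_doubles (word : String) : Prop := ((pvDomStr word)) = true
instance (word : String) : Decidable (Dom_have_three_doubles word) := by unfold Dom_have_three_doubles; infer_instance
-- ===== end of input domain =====

-- B replaces A's backtracking counter loop by a flat sliding-window scan (same cost; simpler).

-- ===== PORT A =====
-- A's while-loop, state (i, num_doubles), with a fuel guard for totality only
-- (the fuel (|w|+2)^2 is proved sufficient below).
def pvALoop (w : List Char) : Nat → Int → Int → Bool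
  | 0, _, _ => false
  | fuel+1, i, nd =>
    if i < (w.length : Int) - 1 then
      if PySem.List.pyGet? w i = PySem.List.pyGet? w (i+1) then
        if nd + 1 > 2 then true
        else pvALoop w fuel (i+2) (nd+1)
      else pvALoop w fuel (i + 1 - 2*nd) 0
    else false

def have_three_doubles (word : String) : Bool :=
  let w := (PySem.Str.lower word).toList
  pvALoop w ((w.length + 2) * (w.length + 2)) 0 0

-- ===== PORT B =====
def have_three_doubles_alt (word : String) : Bool :=
  let w := (PySem.Str.lower word).toList
  (List.range (w.length - 5)).any (fun i =>
    w.getD i ' ' == w.getD (i+1) ' ' &&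
    w.getD (i+2) ' ' == w.getD (i+3) ' ' &&
    w.getD (i+4) ' ' == w.getD (i+5) ' ')

-- ===== PRECONDITION & SPEC =====
def Spec_have_three_doubles (word : String) (out : Bool) : Prop := out = have_three_doubles_alt word
instance (word : String) (out : Bool) : Decidable (Spec_have_three_doubles word out) := by unfold Spec_have_three_doubles; infer_instance

-- ===== CLAIM (what is proved, stated in full; the proofs are below) =====
def Claim_equal_have_three_doubles : Prop := ∀ (word : String), Dom_have_three_doubles word → Spec_have_three_doubles word (have_three_doubles word)

-- ===== LEMMAS AND PROOFS =====

-- three aligned consecutive doubles starting at position t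
def pvTrip (w : List Char) (t : Nat) : Prop :=
  t + 5 < w.length ∧
  w.getD t ' ' = w.getD (t+1) ' ' ∧
  w.getD (t+2) ' ' = w.getD (t+3) ' ' ∧
  w.getD (t+4) ' ' = w.getD (t+5) ' '


theorem pvALoop_eq (w : List Char) :
    ∀ (fuel s nd : Nat), nd ≤ 2 → s ≤ w.length →
    (∀ k, k < nd → w.getD (s + 2*k) ' ' = w.getD (s + 2*k + 1) ' ') →
    (w.length + 2 - s) * (w.length + 2) - nd ≤ fuel →
    (pvALoop w fuel ((s : Int) + 2 * (nd : Int)) (nd : Int) = true ↔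
      ∃ t, s ≤ t ∧ pvTrip w t) := by
  intro fuel
  induction fuel with
  | zero =>
    intro s nd hnd hs _ hf
    exfalso
    have h2 : 2 * (w.length + 2) ≤ (w.length + 2 - s) * (w.length + 2) :=
      Nat.mul_le_mul_right _ (by omega)
    omega
  | succ fu ih =>
    intro s nd hnd hs hd hf
    rw [pvALoop]
    by_cases hg : s + 2*nd + 2 ≤ w.length
    · rw [if_pos (by omega)]
      have hi1 : s + 2*nd < w.length := by omega
      have hi2 : s + 2*nd + 1 < w.length := by omega
      have e1 : (s : Int) + 2 * (nd : Int) = ((s + 2*nd : Nat) : Int) := by push_cast; ring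
      have e2 : (s : Int) + 2 * (nd : Int) + 1 = ((s + 2*nd + 1 : Nat) : Int) := by push_cast; ring
      rw [e1]
      have e2' : ((s + 2*nd : Nat) : Int) + 1 = ((s + 2*nd + 1 : Nat) : Int) := by push_cast; ring
      rw [e2', PySem.List.pyGet?_natCast, PySem.List.pyGet?_natCast,
          List.getElem?_eq_getElem hi1, List.getElem?_eq_getElem hi2]
      have hget : ∀ (j : Nat) (h : j < w.length), w[j] = w.getD j ' ' := by
        intro j h; rw [List.getD_eq_getElem w ' ' h]
      by_cases hc : w.getD (s + 2*nd) ' ' = w.getD (s + 2*nd + 1) ' '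
      · rw [if_pos (by rw [hget _ hi1, hget _ hi2, hc])]
        by_cases h3 : nd = 2
        · subst h3
          rw [if_pos (by norm_num)]
          have htrip : pvTrip w s := by
            refine ⟨by omega, ?_, ?_, ?_⟩
            · have := hd 0 (by omega); simpa using this
            · have := hd 1 (by omega); simpa using this
            · simpa using hc
          simp only [true_iff]
          exact ⟨s, le_refl s, htrip⟩
        · rw [if_neg (by omega)]
          have e3 : ((s + 2*nd : Nat) : Int) + 2 = (s : Int) + 2 * ((nd+1 : Nat) : Int) := by
            push_cast; ring
          have e4 : (nd : Int) + 1 = ((nd+1 : Nat) : Int) := by push_cast; ring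
          rw [e3, e4]
          apply ih s (nd+1) (by omega) hs
          · intro k hk
            by_cases hkn : k < nd
            · exact hd k hkn
            · have : k = nd := by omega
              subst this; exact hc
          · omega
      · rw [if_neg (by rw [hget _ hi1, hget _ hi2]; simpa using hc)]
        have e5 : ((s + 2*nd + 1 : Nat) : Int) - 2 * (nd : Int) = ((s+1 : Nat) : Int) + 2 * ((0 : Nat) : Int) := by
          push_cast; ring
        rw [e5]
        have hmul : (w.length + 2 - s) * (w.length + 2) = (w.length + 1 - s) * (w.length + 2) + (w.length + 2) := by
          have h' : w.length + 2 - s = (w.length + 1 - s) + 1 := by omega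
          rw [h']; ring
        have hfu : (w.length + 2 - (s+1)) * (w.length + 2) - 0 ≤ fu := by
          have h'' : w.length + 2 - (s+1) = w.length + 1 - s := by omega
          rw [h'', Nat.sub_zero]
          omega
        have hrec := ih (s+1) 0 (by omega) (by omega) (by intro k hk; omega) hfu
        simp only [Nat.cast_zero, mul_zero, add_zero] at hrec ⊢
        rw [hrec]
        constructor
        · rintro ⟨t, hst, ht⟩; exact ⟨t, by omega, ht⟩
        · rintro ⟨t, hst, ht⟩
          rcases Nat.eq_or_lt_of_le hst with heq | hlt
          · exfalso
            subst heq
            simp only [pvTrip] at ht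
            obtain ⟨-, h0, h1, h2⟩ := ht
            interval_cases nd
            · exact hc (by simpa using h0)
            · exact hc (by simpa using h1)
            · exact hc (by simpa using h2)
          · exact ⟨t, by omega, ht⟩
    · rw [if_neg (by omega)]
      simp only [Bool.false_eq_true, false_iff, not_exists]
      intro t hc
      obtain ⟨hst, ht⟩ := hc
      simp only [pvTrip] at ht
      omega

theorem alt_eq (word : String) :
    (have_three_doubles_alt word = true ↔
      ∃ t, pvTrip ((PySem.Str.lower word).toList) t) := by
  unfold have_three_doubles_alt
  set w := (PySem.Str.lower word).toList with hw
  rw [List.any_eq_true]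
  constructor
  · rintro ⟨t, htm, htb⟩
    have htr : t < w.length - 5 := List.mem_range.mp htm
    simp only [Bool.and_eq_true, beq_iff_eq] at htb
    exact ⟨t, by omega, htb.1.1, htb.1.2, htb.2⟩
  · rintro ⟨t, ht⟩
    simp only [pvTrip] at ht
    obtain ⟨ht5, h0, h1, h2⟩ := ht
    simp only [List.getD_eq_getElem?_getD] at h0 h1 h2
    exact ⟨t, List.mem_range.mpr (by omega), by simp [h0, h1, h2]⟩

-- ===== VERDICT (by name: the statement is the Claim_ definition above) =====
theorem have_three_doubles_spec : Claim_equal_have_three_doubles := by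
  intro word _
  unfold Spec_have_three_doubles have_three_doubles
  rw [Bool.eq_iff_iff, alt_eq]
  set w := (PySem.Str.lower word).toList with hw
  have hmain := pvALoop_eq w ((w.length + 2) * (w.length + 2)) 0 0 (by omega) (by omega)
    (by intro k hk; omega) (by simp)
  simpa using hmain
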